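-- pv_equiv track=rewrite | github.com/pypi-data/pypi-mirror-93 | packages/rantanplan/rantanplan-0.6.0.tar.gz/rantanplan-0.6.0/src/rantanplan/structures.py | has_mixed_length_verses
-- ===== SOURCE A (Python) =====
-- def has_mixed_length_verses(length_a, length_b, ranges_list):
--     """Given two numbers, checks whether all ranges contain both of them,
--     and only those numbers, at least once.
--     This function generates two binary numbers, one for each length,
--     with `1` indicating the number is found within a given position in the
--     range, and `0` when not found.
--     After that, a logical `OR` is applied between the two numbers and the
--     output is compared with a binary number with just `1`'s and the length of
--     the original list of ranges.
--
--     For example: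
--     length_a: 011001
--     length_b: 101001
--
--     Both numbers are greater than one so that means at least one of each length
--     has been found and we proceed to calculate the `OR` output
--
--     length_a:    011101
--     length_b:    101011  OR
--                  ------
--     result       111111
--
--     111111 is the same as the expected output 111111 so the condition evaluates
--     as `True`
--
--     :param length_a: First length to be checked
--     :param length_b: Second length to be checked
--
--     :param ranges_list: List of verse length ranges
--     :return: `True` if all verses pass the condition, `False` otherwise
--     """
--     contains_a = 0
--     contains_b = 0
--     for (index, interval) in enumerate(ranges_list):
--         found_short = length_a in interval
--         found_long = length_b in interval
--         if not found_short and not found_long: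
--             # Early termination
--             return False
--         if found_short:
--             contains_a |= 1 << index
--         if found_long:
--             contains_b |= 1 << index
--     return (contains_a > 0) and (
--             contains_b > 0) and (
--             contains_a | contains_b == (1 << len(ranges_list)) - 1)
-- ===== SOURCE B (Python) =====
-- def has_mixed_length_verses(length_a, length_b, ranges_list):
--     return (any(length_a in i for i in ranges_list)
--             and any(length_b in i for i in ranges_list)
--             and all(length_a in i or length_b in i for i in ranges_list))
-- ===== Notes on version B (the rewrite author's own statement) =====
-- stated objective: idiomatic
-- what changed: Replaces the early-exit enumerate loop with bitmask accumulators by a single boolean expression of three quantifier scans (any/any/all); the redundant full-mask comparison disappears because it is always satisfied once the loop completes.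
import Mathlib
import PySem

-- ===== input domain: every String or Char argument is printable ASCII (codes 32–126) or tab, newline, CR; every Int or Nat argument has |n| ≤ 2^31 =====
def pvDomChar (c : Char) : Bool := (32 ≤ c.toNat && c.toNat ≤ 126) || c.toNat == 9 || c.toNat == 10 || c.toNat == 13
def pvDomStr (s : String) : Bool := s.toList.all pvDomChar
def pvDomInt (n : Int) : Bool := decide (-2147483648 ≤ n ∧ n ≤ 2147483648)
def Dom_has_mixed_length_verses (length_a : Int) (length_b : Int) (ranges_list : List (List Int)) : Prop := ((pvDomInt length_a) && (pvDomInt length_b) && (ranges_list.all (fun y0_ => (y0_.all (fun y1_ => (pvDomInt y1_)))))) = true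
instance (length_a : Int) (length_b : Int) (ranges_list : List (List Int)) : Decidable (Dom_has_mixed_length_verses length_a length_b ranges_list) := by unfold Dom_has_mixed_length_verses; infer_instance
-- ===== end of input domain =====

-- B replaces A's early-exit loop with bitmask accumulators by three quantifier scans
-- (any/any/all); the objective is a more idiomatic, plainer formulation (no speed claim).

-- ===== PORT A =====
-- the enumerate-loop of A; `index` is the enumerate counter, `ca`/`cb` the bitmasks,
-- `n` the length of the original ranges_list (Python's `len(ranges_list)` in the return).
-- `1 << index` is ported as `(1 : Int) <<< (index : Int)` and `|` as `Int.lor` (exact).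
def pvLoopA (length_a : Int) (length_b : Int) (n : Nat) : Nat → Int → Int → List (List Int) → Bool
  | _, ca, cb, [] =>
      decide (ca > 0) && decide (cb > 0) &&
        decide (Int.lor ca cb = (1 : Int) <<< (n : Int) - 1)
  | index, ca, cb, interval :: rest =>
      let found_short := interval.contains length_a
      let found_long := interval.contains length_b
      if !found_short && !found_long then false
      else
        pvLoopA length_a length_b n (index + 1)
          (if found_short then Int.lor ca ((1 : Int) <<< (index : Int)) else ca)
          (if found_long then Int.lor cb ((1 : Int) <<< (index : Int)) else cb)
          rest

def has_mixed_length_verses (length_a : Int) (length_b : Int) (ranges_list : List (List Int)) : Bool :=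
  pvLoopA length_a length_b ranges_list.length 0 0 0 ranges_list

-- ===== PORT B =====
def has_mixed_length_verses_alt (length_a : Int) (length_b : Int) (ranges_list : List (List Int)) : Bool :=
  (ranges_list.any (fun i => i.contains length_a)) &&
  (ranges_list.any (fun i => i.contains length_b)) &&
  (ranges_list.all (fun i => i.contains length_a || i.contains length_b))

-- ===== PRECONDITION & SPEC =====
def Spec_has_mixed_length_verses (length_a : Int) (length_b : Int) (ranges_list : List (List Int)) (out : Bool) : Prop := out = has_mixed_length_verses_alt length_a length_b ranges_list
instance (length_a : Int) (length_b : Int) (ranges_list : List (List Int)) (out : Bool) : Decidable (Spec_has_mixed_length_verses length_a length_b ranges_list out) := by unfold Spec_has_mixed_length_verses; infer_instance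

-- ===== CLAIM (what is proved, stated in full; the proofs are below) =====
def Claim_equal_has_mixed_length_verses : Prop := ∀ (length_a : Int) (length_b : Int) (ranges_list : List (List Int)), Dom_has_mixed_length_verses length_a length_b ranges_list → Spec_has_mixed_length_verses length_a length_b ranges_list (has_mixed_length_verses length_a length_b ranges_list)

-- ===== LEMMAS AND PROOFS =====

lemma pv_two_pow_sub_one_lor (i : Nat) : ((2 ^ i - 1 : Nat) ||| 2 ^ i) = 2 ^ (i + 1) - 1 := by
  apply Nat.eq_of_testBit_eq; intro j
  simp only [Nat.testBit_lor, Nat.testBit_two_pow_sub_one, Nat.testBit_two_pow]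
  by_cases h1 : j < i
  · have h2 : j < i + 1 := by omega
    have h3 : i ≠ j := by omega
    simp [h1, h2, h3]
  · by_cases h2 : i = j
    · simp [h2]
    · have h3 : ¬ j < i + 1 := by omega
      simp [h1, h2, h3]

lemma pv_lor_two_pow_pos (a i : Nat) : 0 < a ||| 2 ^ i := by
  rcases Nat.eq_zero_or_pos (a ||| 2 ^ i) with h | h
  · exfalso
    have := congrArg (Nat.testBit · i) h
    simp [Nat.testBit_two_pow] at this
  · exact h

lemma pv_int_lor_natCast (na nb : Nat) : Int.lor (na : Int) (nb : Int) = ((na ||| nb : Nat) : Int) := by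
  exact_mod_cast rfl

lemma pv_lor_cast (na i : Nat) : Int.lor (na : Int) ((2 : Int) ^ i) = ((na ||| 2 ^ i : Nat) : Int) := by
  rw [show ((2 : Int) ^ i) = ((2 ^ i : Nat) : Int) by push_cast; ring, pv_int_lor_natCast]

lemma pv_one_shiftLeft (i : Nat) : ((1 : Int) <<< (i : Int)) = ((2 ^ i : Nat) : Int) := by
  rw [Int.one_shiftLeft]

-- loop invariant: the two masks are nonnegative (given as Nats), their OR is 2^idx - 1,
-- and mask positivity records "found so far"; under it the loop computes B's three scans.
lemma pvLoopA_eq (a b : Int) (n : Nat) :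
    ∀ (rest : List (List Int)) (idx na nb : Nat),
      idx + rest.length = n → (na ||| nb) = 2 ^ idx - 1 →
      pvLoopA a b n idx (na : Int) (nb : Int) rest =
        ((decide (0 < na) || rest.any (fun i => i.contains a)) &&
         (decide (0 < nb) || rest.any (fun i => i.contains b)) &&
         rest.all (fun i => i.contains a || i.contains b)) := by
  intro rest
  induction rest with
  | nil =>
      intro idx na nb hn hinv
      simp only [List.length_nil, Nat.add_zero] at hn
      subst hn
      simp only [pvLoopA, List.any_nil, List.all_nil, Bool.or_false, Bool.and_true,
        pv_int_lor_natCast, pv_one_shiftLeft, hinv]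
      have h1 : (1 : Nat) ≤ 2 ^ idx := Nat.one_le_two_pow
      have : ((2 ^ idx : Nat) : Int) - 1 = ((2 ^ idx - 1 : Nat) : Int) := by push_cast [h1]; ring
      rw [this]
      simp [Int.natCast_pos]
  | cons interval rest ih =>
      intro idx na nb hn hinv
      simp only [List.length_cons] at hn
      by_cases hfs : interval.contains a = true <;> by_cases hfl : interval.contains b = true
      · -- both found
        simp only [pvLoopA, hfs, hfl]
        norm_num [pv_one_shiftLeft, pv_lor_cast]
        rw [ih (idx + 1) (na ||| 2 ^ idx) (nb ||| 2 ^ idx) (by omega)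
            (by rw [show (na ||| 2 ^ idx) ||| (nb ||| 2 ^ idx) = (na ||| nb) ||| 2 ^ idx by ac_rfl,
                  hinv, pv_two_pow_sub_one_lor])]
        have ha : a ∈ interval := by simpa using hfs
        have hb : b ∈ interval := by simpa using hfl
        simp [ha, hb, pv_lor_two_pow_pos]
      · -- only a found
        simp only [pvLoopA, hfs, hfl]
        norm_num [pv_one_shiftLeft, pv_lor_cast]
        rw [ih (idx + 1) (na ||| 2 ^ idx) nb (by omega)
            (by rw [show (na ||| 2 ^ idx) ||| nb = (na ||| nb) ||| 2 ^ idx by ac_rfl,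
                  hinv, pv_two_pow_sub_one_lor])]
        have ha : a ∈ interval := by simpa using hfs
        have hb : b ∉ interval := by simpa using hfl
        simp [ha, hb, pv_lor_two_pow_pos]
      · -- only b found
        simp only [pvLoopA, hfs, hfl]
        norm_num [pv_one_shiftLeft, pv_lor_cast]
        rw [ih (idx + 1) na (nb ||| 2 ^ idx) (by omega)
            (by rw [show na ||| (nb ||| 2 ^ idx) = (na ||| nb) ||| 2 ^ idx by ac_rfl,
                  hinv, pv_two_pow_sub_one_lor])]
        have ha : a ∉ interval := by simpa using hfs
        have hb : b ∈ interval := by simpa using hfl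
        simp [ha, hb, pv_lor_two_pow_pos]
      · -- neither: early return False, and B's `all` is false on the head
        have ha : a ∉ interval := by simpa using hfs
        have hb : b ∉ interval := by simpa using hfl
        simp [pvLoopA, ha, hb]

-- ===== VERDICT (by name: the statement is the Claim_ definition above) =====
theorem has_mixed_length_verses_spec : Claim_equal_has_mixed_length_verses := by
  intro a b rl _
  unfold Spec_has_mixed_length_verses has_mixed_length_verses has_mixed_length_verses_alt
  have h := pvLoopA_eq a b rl.length rl 0 0 0 (by simp) (by simp)
  simpa using h
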